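-- pv_equiv track=rewrite | github.com/serna/webCEAB | webCEAB/modules/rutinas.py | encripta
-- ===== SOURCE A (Python) =====
-- def encripta(res):
-- 	""" Convierte una cadena numerica (que en principio solo contiene 0,1,2 o 3) y la codifica en ascii
--
-- 		res [string]: cadena de enteros
-- 		return [string]: cadena codificada
--
-- 		por ejemplo, si se recibe la cadean 012332, el programa primero verifica que sean 3 caracteres o multiplos
-- 		de este numero, eso es importante ya que cada caracter de la cadena ascii que quenere este codigo representa
-- 		3 respuestas, si recibimos una cadena de respuestas en las que no se cumpla esta condicion, llenamos con cero
-- 		los espacios vacios, en alguna otra parte, externo a este codigo, debe de estar indicado hasta donde se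
-- 		consideran respuestas validas, luego de eso el programa convierte el caracter a su equivalente numerico
-- 		y hace una operacion binaria  que recorre a este primer numero 4 bits a la izquierda, por ejemplo el primer
-- 		caracter numerico que tenemos es el 0, el cual se convierte a 0b00 que despues de correrlo 4 caracteres
-- 		se convierte a 0b0000, haciendo el mismo procedimiento con el siguiente caracter numerico, pero solo
-- 		recorriendolo 2 bits a la izquierda 1=0b01 que se convierte en 0b0100, sumando estos dos valores tenemos
-- 		que el resultado de lasuma es 0b0100 y finalmente el siguiente caracter numerico 2=0b10m, sumandolo al anterior
-- 		resuta en 0b0110 que es el 6 decimal, sumandole 33 para estar en el inicio de los asciis validos para este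
-- 		algoritmo tenemos que es el numero 39 que equivale al caracter "'", haciendolo de manera equivalente para
-- 		los caracteres 332 obtendriamos el caracter "_"
-- 	"""
-- 	cadena = ""
-- 	ans = 0
-- 	if len(res)%3==1:
-- 		res += '0'
-- 	if len(res)%3==2:
-- 		res += '00'
-- 	cnt=6
-- 	for car in res:
-- 		cnt -= 2
-- 		num = int(car)
-- 		ans += (num<<cnt)
-- 		if cnt == 0:
-- 			cadena += chr(ans+33)
-- 			ans=0
-- 			cnt = 6
-- 	return cadena
-- ===== SOURCE B (Python) =====
-- def encripta(res):
--     # Pad with zeros up to a multiple of 3, then encode each 3-digit chunk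
--     # (weights 16/4/1, offset 33) in one pass over chunks.
--     res += '0' * ((3 - len(res) % 3) % 3)
--     out = []
--     for i in range(0, len(res), 3):
--         chunk = res[i:i + 3]
--         val = int(chunk[0]) * 16 + int(chunk[1]) * 4 + int(chunk[2])
--         out.append(chr(val + 33))
--     return ''.join(out)
-- ===== Notes on version B (the rewrite author's own statement) =====
-- stated objective: simpler
-- what changed: B replaces A's per-character shift/accumulator state machine (cnt/ans with bit shifts, and two sequential padding ifs that can add 3 pad chars) with a single uniform zero-pad to a multiple of 3 followed by a loop over 3-character chunks computing 16/4/1-weighted values directly.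
import Mathlib
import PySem

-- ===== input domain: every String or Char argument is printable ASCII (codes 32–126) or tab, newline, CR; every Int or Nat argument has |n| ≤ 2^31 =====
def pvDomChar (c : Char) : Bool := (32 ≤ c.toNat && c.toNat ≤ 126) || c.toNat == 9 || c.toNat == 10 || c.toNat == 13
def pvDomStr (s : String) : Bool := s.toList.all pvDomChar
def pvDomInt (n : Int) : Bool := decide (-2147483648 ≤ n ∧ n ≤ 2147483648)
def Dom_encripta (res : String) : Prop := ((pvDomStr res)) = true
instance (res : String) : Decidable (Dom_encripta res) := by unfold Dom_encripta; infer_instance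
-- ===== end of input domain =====

-- B replaces A's per-character shift/accumulator state machine with a uniform zero-pad
-- and a direct loop over 3-character chunks (simpler decomposition; same cost).

-- ===== PORT A =====
-- A's loop: for car in res: cnt -= 2; num = int(car); ans += num << cnt;
--           if cnt == 0: cadena += chr(ans+33); ans = 0; cnt = 6
-- The accumulator `cadena` is kept as a List Char and wrapped by String.ofList at the end
-- (Lean's String internals are opaque to the kernel).  int(car) is ported as
-- c.toNat - 48, exact for the digit characters Pre_ admits; num << cnt is num * 2^cnt
-- (exact for nonnegative num).
def encriptaLoop : List Char → List Char → Nat → Nat → List Char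
  | [], cadena, _, _ => cadena
  | car :: rest, cadena, ans, cnt =>
    let cnt' := cnt - 2
    let num := car.toNat - 48
    let ans' := ans + num * 2 ^ cnt'
    if cnt' = 0 then
      encriptaLoop rest (cadena ++ [Char.ofNat (ans' + 33)]) 0 6
    else
      encriptaLoop rest cadena ans' cnt'

def encripta (res : String) : String :=
  let l := res.toList
  let l := if l.length % 3 = 1 then l ++ ['0'] else l
  let l := if l.length % 3 = 2 then l ++ ['0', '0'] else l
  String.ofList (encriptaLoop l [] 0 6)

-- ===== PORT B =====
-- Source B's chunk loop: each 3-character slice becomes one output character.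
def encChunks : List Char → List Char
  | a :: b :: c :: rest =>
    Char.ofNat ((a.toNat - 48) * 16 + (b.toNat - 48) * 4 + (c.toNat - 48) + 33)
      :: encChunks rest
  | _ => []

def encripta_alt (res : String) : String :=
  let l := res.toList ++ List.replicate ((3 - res.toList.length % 3) % 3) '0'
  String.ofList (encChunks l)

-- ===== PRECONDITION & SPEC =====
-- Pre_: every character is an ASCII digit; on any other character Python's int(car)
-- raises ValueError in both A and B.
def Pre_encripta (res : String) : Prop := res.toList.all PySem.Chars.isdigit = true
instance (res : String) : Decidable (Pre_encripta res) := by unfold Pre_encripta; infer_instance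
def pvWitness_encripta : String := "012332"
def Spec_encripta (res : String) (out : String) : Prop := out = encripta_alt res
instance (res : String) (out : String) : Decidable (Spec_encripta res out) := by unfold Spec_encripta; infer_instance

-- ===== CLAIM (what is proved, stated in full; the proofs are below) =====
def Claim_equal_encripta : Prop := ∀ (res : String), Dom_encripta res → Pre_encripta res → Spec_encripta res (encripta res)

-- ===== LEMMAS AND PROOFS =====

-- Unfolds one full 3-character round of A's loop (cnt 6 → 4 → 2 → 0, one flush).
theorem loop_step (a b c : Char) (rest cadena : List Char) :
    encriptaLoop (a :: b :: c :: rest) cadena 0 6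
      = encriptaLoop rest
          (cadena ++ [Char.ofNat ((a.toNat - 48) * 16 + (b.toNat - 48) * 4 + (c.toNat - 48) + 33)])
          0 6 := by
  simp [encriptaLoop]

-- A's loop, started at (ans, cnt) = (0, 6) on m ++ t with 3 ∣ m.length and a short tail t
-- (at most 2 leftover characters, which A reads but never flushes), appends exactly
-- B's chunk encoding of m.
theorem encriptaLoop_eq (m t acc : List Char) (hm : m.length % 3 = 0) (ht : t.length ≤ 2) :
    encriptaLoop (m ++ t) acc 0 6 = acc ++ encChunks m := by
  match m with
  | [] =>
    match t with
    | [] => simp [encriptaLoop, encChunks]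
    | [x] => simp [encriptaLoop, encChunks]
    | [x, y] => simp [encriptaLoop, encChunks]
    | _ :: _ :: _ :: _ => simp at ht
  | [a] => simp at hm
  | [a, b] => simp at hm
  | a :: b :: c :: m' =>
    have hm' : m'.length % 3 = 0 := by simp at hm; omega
    have ih := encriptaLoop_eq m' t
      (acc ++ [Char.ofNat ((a.toNat - 48) * 16 + (b.toNat - 48) * 4 + (c.toNat - 48) + 33)])
      hm' ht
    rw [List.cons_append, List.cons_append, List.cons_append, loop_step, ih]
    simp [encChunks]
termination_by m.length

-- ===== VERDICT (by name: the statement is the Claim_ definition above) =====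
theorem encripta_spec : Claim_equal_encripta := by
  intro res _ _
  show String.ofList
      (encriptaLoop
        (if (if res.toList.length % 3 = 1 then res.toList ++ ['0'] else res.toList).length % 3 = 2
          then (if res.toList.length % 3 = 1 then res.toList ++ ['0'] else res.toList) ++ ['0', '0']
          else (if res.toList.length % 3 = 1 then res.toList ++ ['0'] else res.toList)) [] 0 6)
    = String.ofList (encChunks (res.toList ++ List.replicate ((3 - res.toList.length % 3) % 3) '0'))
  generalize res.toList = l
  have h3 : l.length % 3 = 0 ∨ l.length % 3 = 1 ∨ l.length % 3 = 2 := by omega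
  rcases h3 with h | h | h
  · -- no padding in A; B pads 0 zeros
    rw [if_neg (show ¬l.length % 3 = 1 by omega)]
    rw [if_neg (show ¬l.length % 3 = 2 by omega)]
    have := encriptaLoop_eq l [] [] h (by simp)
    simp at this
    simp [h, this]
  · -- A pads '0' then '00' (3 chars, the last one is read but never flushed); B pads 2 zeros
    rw [if_pos h]
    rw [if_pos (show (l ++ ['0']).length % 3 = 2 by simp; omega)]
    rw [show l ++ ['0'] ++ ['0', '0'] = (l ++ ['0', '0']) ++ ['0'] by simp]
    rw [encriptaLoop_eq (l ++ ['0', '0']) ['0'] [] (by simp; omega) (by simp)]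
    simp [h]
  · -- A pads '00' (the last one is read but never flushed); B pads 1 zero
    rw [if_neg (show ¬l.length % 3 = 1 by omega), if_pos h]
    rw [show l ++ ['0', '0'] = (l ++ ['0']) ++ ['0'] by simp]
    rw [encriptaLoop_eq (l ++ ['0']) ['0'] [] (by simp; omega) (by simp)]
    simp [h]
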